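-- pv_equiv track=rewrite | github.com/mp3monster/fluent-bit-opamp | agent_broker/opamp_broker/planner/rule_first_planner.py | _find_otel_agents_tool_name
-- ===== SOURCE A (Python) =====
-- def _find_otel_agents_tool_name(tool_names: list[str]) -> str | None:
--     """Return the best discovered tool name for listing/filtering agents."""
--     for name in tool_names:
--         if "otel_agents" in name.lower():
--             return name
--     for name in tool_names:
--         lowered = name.lower()
--         if "agent" in lowered and "tool" in lowered:
--             return name
--     return None
-- ===== SOURCE B (Python) =====
-- def _find_otel_agents_tool_name(tool_names: list[str]) -> str | None:
--     """Return the best discovered tool name for listing/filtering agents."""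
--     fallback = None
--     for name in tool_names:
--         lowered = name.lower()
--         if "otel_agents" in lowered:
--             return name
--         if fallback is None and "agent" in lowered and "tool" in lowered:
--             fallback = name
--     return fallback
-- ===== Notes on version B (the rewrite author's own statement) =====
-- stated objective: simpler
-- what changed: Replaced A's two sequential priority passes by a single pass that returns immediately on an 'otel_agents' hit and records the first 'agent'+'tool' name in a fallback variable returned after the loop; each name is lowered once instead of twice.
import Mathlib
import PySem

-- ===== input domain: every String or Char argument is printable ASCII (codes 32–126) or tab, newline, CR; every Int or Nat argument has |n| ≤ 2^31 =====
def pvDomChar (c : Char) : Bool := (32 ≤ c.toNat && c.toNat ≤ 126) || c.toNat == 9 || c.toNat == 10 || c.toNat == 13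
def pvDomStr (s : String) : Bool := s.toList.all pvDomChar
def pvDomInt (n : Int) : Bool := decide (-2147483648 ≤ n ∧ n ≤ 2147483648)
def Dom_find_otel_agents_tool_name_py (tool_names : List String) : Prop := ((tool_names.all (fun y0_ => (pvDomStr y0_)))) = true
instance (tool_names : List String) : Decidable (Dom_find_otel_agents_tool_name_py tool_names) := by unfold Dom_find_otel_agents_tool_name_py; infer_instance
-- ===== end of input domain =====

-- B: single pass with a fallback variable instead of A's two priority passes; same return value, no side effects.
-- ===== PORT A =====
-- first loop of A: return name on "otel_agents" hit
def pvLoopA1 : List String → Option String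
  | [] => none
  | name :: rest =>
    if PySem.Str.isIn "otel_agents" (PySem.Str.lower name) then some name
    else pvLoopA1 rest

-- second loop of A: return name when lowered contains both "agent" and "tool"
def pvLoopA2 : List String → Option String
  | [] => none
  | name :: rest =>
    let lowered := PySem.Str.lower name
    if PySem.Str.isIn "agent" lowered && PySem.Str.isIn "tool" lowered then some name
    else pvLoopA2 rest

def find_otel_agents_tool_name_py (tool_names : List String) : Option String :=
  match pvLoopA1 tool_names with
  | some name => some name
  | none =>
    match pvLoopA2 tool_names with
    | some name => some name
    | none => none

-- ===== PORT B =====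
-- B's single loop, carrying the fallback variable
def pvLoopB : List String → Option String → Option String
  | [], fallback => fallback
  | name :: rest, fallback =>
    let lowered := PySem.Str.lower name
    if PySem.Str.isIn "otel_agents" lowered then some name
    else pvLoopB rest
      (if fallback.isNone && (PySem.Str.isIn "agent" lowered && PySem.Str.isIn "tool" lowered)
       then some name else fallback)

def find_otel_agents_tool_name_py_alt (tool_names : List String) : Option String :=
  pvLoopB tool_names none

-- ===== PRECONDITION & SPEC =====
def Spec_find_otel_agents_tool_name_py (tool_names : List String) (out : Option String) : Prop := out = find_otel_agents_tool_name_py_alt tool_names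
instance (tool_names : List String) (out : Option String) : Decidable (Spec_find_otel_agents_tool_name_py tool_names out) := by unfold Spec_find_otel_agents_tool_name_py; infer_instance

-- ===== CLAIM (what is proved, stated in full; the proofs are below) =====
def Claim_equal_find_otel_agents_tool_name_py : Prop := ∀ (tool_names : List String), Dom_find_otel_agents_tool_name_py tool_names → Spec_find_otel_agents_tool_name_py tool_names (find_otel_agents_tool_name_py tool_names)

-- ===== LEMMAS AND PROOFS =====

-- ===== VERDICT (by name: the statement is the Claim_ definition above) =====
-- loop invariant: B's single pass equals A's first pass, then the fallback, then A's second pass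
theorem pvLoopB_eq (xs : List String) (fb : Option String) :
    pvLoopB xs fb =
      (match pvLoopA1 xs with
       | some n => some n
       | none => match fb with
         | some f => some f
         | none => pvLoopA2 xs) := by
  induction xs generalizing fb with
  | nil => cases fb <;> simp [pvLoopB, pvLoopA1, pvLoopA2]
  | cons name rest ih =>
    by_cases h1 : PySem.Chars.isIn ['o','t','e','l','_','a','g','e','n','t','s']
        (PySem.Chars.lower name.toList) = true <;>
      by_cases h2 : (PySem.Chars.isIn ['a','g','e','n','t'] (PySem.Chars.lower name.toList) = true ∧
          PySem.Chars.isIn ['t','o','o','l'] (PySem.Chars.lower name.toList) = true) <;>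
      cases fb <;>
      simp [pvLoopB, pvLoopA1, pvLoopA2, h1, h2, ih]

theorem find_otel_agents_tool_name_py_spec : Claim_equal_find_otel_agents_tool_name_py := by
  intro xs _
  unfold Spec_find_otel_agents_tool_name_py find_otel_agents_tool_name_py find_otel_agents_tool_name_py_alt
  rw [pvLoopB_eq]
  cases pvLoopA1 xs <;> cases hx : pvLoopA2 xs <;> simp
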